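-- pv_equiv track=rewrite | github.com/k-harada/AtCoder | ABC/ABC277/C.py | solve
-- ===== SOURCE A (Python) =====
-- from collections import deque
--
-- def solve(n, ab_list):
--     g = dict()
--     visited = dict()
--     for a, b in ab_list:
--         if a not in g.keys():
--             g[a] = dict()
--         g[a][b] = 1
--         if b not in g.keys():
--             g[b] = dict()
--         g[b][a] = 1
--         visited[a] = 0
--         visited[b] = 0
--
--     queue = deque()
--     if 1 in g.keys():
--         queue.append(1)
--     visited[1] = 1
--     res = 1
--
--     while len(queue):
--         p = queue.popleft()
--         for q in g[p].keys():
--             if visited[q] == 0: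
--                 visited[q] = 1
--                 res = max(res, q)
--                 queue.append(q)
--     return res
-- ===== SOURCE B (Python) =====
-- def solve(n, ab_list):
--     # edge-saturation: grow the component of 1 by sweeping the edge list until stable
--     reached = {1}
--     changed = True
--     while changed:
--         changed = False
--         for a, b in ab_list:
--             if (a in reached) != (b in reached):
--                 reached.add(a)
--                 reached.add(b)
--                 changed = True
--     res = 1
--     for a, b in ab_list:
--         if a in reached:
--             res = max(res, a)
--         if b in reached:
--             res = max(res, b)
--     return res
-- ===== Notes on version B (the rewrite author's own statement) =====
-- stated objective: alternative
-- what changed: Replaced the adjacency-dict + BFS queue/visited traversal by an edge-list saturation: repeatedly sweep the edge list growing the set connected to 1 until a full sweep changes nothing, then take the max endpoint in that set (no adjacency structure, no queue).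
import Mathlib
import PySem

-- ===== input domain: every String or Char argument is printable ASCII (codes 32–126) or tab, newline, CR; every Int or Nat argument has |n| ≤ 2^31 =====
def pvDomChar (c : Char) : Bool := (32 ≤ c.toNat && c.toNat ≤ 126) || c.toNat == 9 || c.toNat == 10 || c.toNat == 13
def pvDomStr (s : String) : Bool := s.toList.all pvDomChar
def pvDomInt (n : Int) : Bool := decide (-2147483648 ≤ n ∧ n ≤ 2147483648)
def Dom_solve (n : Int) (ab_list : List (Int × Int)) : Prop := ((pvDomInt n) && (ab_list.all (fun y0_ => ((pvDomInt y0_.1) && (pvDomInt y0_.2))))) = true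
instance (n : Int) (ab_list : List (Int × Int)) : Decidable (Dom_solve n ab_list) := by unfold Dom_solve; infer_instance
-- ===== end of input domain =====

-- B replaces A's adjacency-dict BFS by edge-list saturation sweeps (alternative algorithm, same results).

-- ===== PORT A =====
-- one iteration of A's edge loop, graph part: g[a][b] = 1 and g[b][a] = 1 (creating inner dicts)
def pvStepG (g : PySem.Dict Int (PySem.Dict Int Int)) (e : Int × Int) :
    PySem.Dict Int (PySem.Dict Int Int) :=
  let g1 := if g.contains e.1 then g else g.insert e.1 PySem.Dict.empty
  let g2 := g1.insert e.1 ((g1.getD e.1 PySem.Dict.empty).insert e.2 1)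
  let g3 := if g2.contains e.2 then g2 else g2.insert e.2 PySem.Dict.empty
  g3.insert e.2 ((g3.getD e.2 PySem.Dict.empty).insert e.1 1)

-- one iteration of A's edge loop, visited part: visited[a] = 0; visited[b] = 0
def pvStepV (vis : PySem.Dict Int Int) (e : Int × Int) : PySem.Dict Int Int :=
  (vis.insert e.1 0).insert e.2 0

-- the body of A's inner 'for q in g[p].keys()' loop, state = (visited, res, queue)
def pvFlip (st : PySem.Dict Int Int × Int × List Int) (q : Int) :
    PySem.Dict Int Int × Int × List Int :=
  if st.1.getD q 0 == 0 then (st.1.insert q 1, max st.2.1 q, st.2.2 ++ [q]) else st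

-- A's while-loop; fuel only makes the recursion total (proved never to run out on the fuel solve passes)
def pvBfs (g : PySem.Dict Int (PySem.Dict Int Int)) :
    Nat → List Int → PySem.Dict Int Int → Int → Int
  | 0, _, _, res => res
  | _ + 1, [], _, res => res
  | fuel + 1, p :: qs, vis, res =>
      let st := ((g.getD p PySem.Dict.empty).keys).foldl pvFlip (vis, res, qs)
      pvBfs g fuel st.2.2 st.1 st.2.1

def solve (n : Int) (ab_list : List (Int × Int)) : Int :=
  let gv := ab_list.foldl (fun gv e => (pvStepG gv.1 e, pvStepV gv.2 e))
              (PySem.Dict.empty, PySem.Dict.empty)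
  let queue : List Int := if gv.1.contains 1 then [1] else []
  let vis := gv.2.insert 1 1
  pvBfs gv.1 (4 * ab_list.length + 2) queue vis 1

-- ===== PORT B =====
-- one edge of a saturation sweep: if exactly one endpoint is reached, add both and record a change
def pvPassStep (st : PySem.Set Int × Bool) (e : Int × Int) : PySem.Set Int × Bool :=
  if st.1.contains e.1 != st.1.contains e.2 then ((st.1.add e.1).add e.2, true) else st

-- B's 'while changed' loop; fuel only makes the recursion total (proved sufficient)
def pvSat (ab : List (Int × Int)) : Nat → PySem.Set Int → PySem.Set Int
  | 0, r => r
  | fuel + 1, r =>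
      let st := ab.foldl pvPassStep (r, false)
      if st.2 then pvSat ab fuel st.1 else st.1

def solve_alt (n : Int) (ab_list : List (Int × Int)) : Int :=
  let reached := pvSat ab_list (2 * ab_list.length + 1) (PySem.Set.ofList [1])
  ab_list.foldl (fun res e =>
    let res1 := if reached.contains e.1 then max res e.1 else res
    if reached.contains e.2 then max res1 e.2 else res1) 1

-- ===== PRECONDITION & SPEC =====
def Spec_solve (n : Int) (ab_list : List (Int × Int)) (out : Int) : Prop := out = solve_alt n ab_list
instance (n : Int) (ab_list : List (Int × Int)) (out : Int) : Decidable (Spec_solve n ab_list out) := by unfold Spec_solve; infer_instance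

-- ===== CLAIM (what is proved, stated in full; the proofs are below) =====
def Claim_equal_solve : Prop := ∀ (n : Int) (ab_list : List (Int × Int)), Dom_solve n ab_list → Spec_solve n ab_list (solve n ab_list)

-- ===== LEMMAS AND PROOFS =====

-- all endpoints of the edge list, with multiplicity
def pvNL (ab : List (Int × Int)) : List Int := ab.flatMap (fun e => [e.1, e.2])

-- undirected adjacency of the edge list
def pvAdj (ab : List (Int × Int)) (u v : Int) : Prop := (u, v) ∈ ab ∨ (v, u) ∈ ab

-- connected to node 1
def pvReach (ab : List (Int × Int)) (v : Int) : Prop := Relation.ReflTransGen (pvAdj ab) 1 v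

-- the set both programs maximise over: node 1 plus the nodes connected to it
def pvP (ab : List (Int × Int)) (v : Int) : Prop := v = 1 ∨ (v ∈ pvNL ab ∧ pvReach ab v)

-- "x is the maximum of the pvP-set"
def pvPost (ab : List (Int × Int)) (x : Int) : Prop := pvP ab x ∧ ∀ v, pvP ab v → v ≤ x

theorem pvPost_unique (ab : List (Int × Int)) (x y : Int)
    (hx : pvPost ab x) (hy : pvPost ab y) : x = y :=
  le_antisymm (hy.2 x hx.1) (hx.2 y hy.1)

theorem pvAdj_memNL (ab : List (Int × Int)) (u v : Int) (h : pvAdj ab u v) :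
    u ∈ pvNL ab ∧ v ∈ pvNL ab := by
  rcases h with h | h <;>
    exact ⟨by simp [pvNL, List.mem_flatMap]; exact ⟨_, _, h, by simp⟩,
           by simp [pvNL, List.mem_flatMap]; exact ⟨_, _, h, by simp⟩⟩

theorem pvNL_cons (e : Int × Int) (l : List (Int × Int)) :
    pvNL (e :: l) = e.1 :: e.2 :: pvNL l := by simp [pvNL]

theorem pvNL_length (ab : List (Int × Int)) : (pvNL ab).length = 2 * ab.length := by
  induction ab with
  | nil => simp [pvNL]
  | cons e l ih => simp [pvNL] at ih ⊢; omega

-- ---- graph-build characterisation ----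

theorem pv_getD_ifins (d : PySem.Dict Int (PySem.Dict Int Int)) (k p : Int) :
    ((if d.contains k then d else d.insert k PySem.Dict.empty).getD p PySem.Dict.empty)
      = d.getD p PySem.Dict.empty := by
  split_ifs with h
  · rfl
  · rw [PySem.Dict.getD_insert]
    split_ifs with hp
    · subst hp
      rw [PySem.Dict.getD_of_not_contains _ _ (by simpa using h)]
    · rfl

theorem pvStepG_contains (g : PySem.Dict Int (PySem.Dict Int Int)) (e : Int × Int) (v : Int) :
    ((pvStepG g e).contains v = true) ↔ (g.contains v = true ∨ v = e.1 ∨ v = e.2) := by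
  unfold pvStepG
  split_ifs with h1 <;>
    simp only [PySem.Dict.contains_insert, beq_iff_eq, Bool.or_eq_true] <;>
    split_ifs <;>
    simp only [PySem.Dict.contains_insert, beq_iff_eq, Bool.or_eq_true] <;>
    tauto

theorem pvStepG_keys (g : PySem.Dict Int (PySem.Dict Int Int)) (e : Int × Int) (p q : Int) :
    q ∈ ((pvStepG g e).getD p PySem.Dict.empty).keys ↔
      (q ∈ (g.getD p PySem.Dict.empty).keys ∨ (p = e.1 ∧ q = e.2) ∨ (p = e.2 ∧ q = e.1)) := by
  unfold pvStepG
  simp only [pv_getD_ifins, PySem.Dict.getD_insert]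
  split_ifs <;> simp_all [PySem.Dict.mem_keys_insert] <;> tauto

theorem pvBuildG (l : List (Int × Int)) (g : PySem.Dict Int (PySem.Dict Int Int)) :
    (∀ v, ((l.foldl pvStepG g).contains v = true) ↔ (g.contains v = true ∨ v ∈ pvNL l)) ∧
    (∀ p q, q ∈ ((l.foldl pvStepG g).getD p PySem.Dict.empty).keys ↔
        (q ∈ (g.getD p PySem.Dict.empty).keys ∨ pvAdj l p q)) := by
  induction l generalizing g with
  | nil => simp [pvNL, pvAdj]
  | cons e l ih =>
    rw [List.foldl_cons]
    refine ⟨fun v => ?_, fun p q => ?_⟩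
    · rw [(ih (pvStepG g e)).1 v, pvStepG_contains, pvNL_cons]
      simp only [List.mem_cons]
      tauto
    · rw [(ih (pvStepG g e)).2 p q, pvStepG_keys]
      simp only [pvAdj, List.mem_cons, Prod.ext_iff]
      tauto

theorem pvBuildV (l : List (Int × Int)) (vis : PySem.Dict Int Int)
    (h : ∀ v, vis.getD v 0 = 0) : ∀ v, (l.foldl pvStepV vis).getD v 0 = 0 := by
  induction l generalizing vis with
  | nil => simpa using h
  | cons e l ih =>
    rw [List.foldl_cons]
    refine ih _ (fun v => ?_)
    simp only [pvStepV, PySem.Dict.getD_insert]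
    split_ifs <;> simp [h]

-- ---- BFS loop invariant ----

def pvU (ab : List (Int × Int)) (vis : PySem.Dict Int Int) : Nat :=
  ((pvNL ab).toFinset.filter (fun v => vis.getD v 0 = 0)).card

def pvInv (ab : List (Int × Int)) (queue : List Int) (vis : PySem.Dict Int Int) (res : Int) : Prop :=
  (∀ v, vis.getD v 0 = 0 ∨ vis.getD v 0 = 1) ∧
  vis.getD 1 0 = 1 ∧
  (∀ p ∈ queue, pvReach ab p) ∧
  (∀ v, vis.getD v 0 = 1 → pvP ab v) ∧
  (∀ v q, vis.getD v 0 = 1 → pvAdj ab v q → vis.getD q 0 = 1 ∨ v ∈ queue) ∧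
  (res = 1 ∨ vis.getD res 0 = 1) ∧
  (∀ v, vis.getD v 0 = 1 → v ≤ res)

theorem pvU_flip (ab : List (Int × Int)) (vis : PySem.Dict Int Int) (q : Int)
    (hq : q ∈ pvNL ab) (h0 : vis.getD q 0 = 0) :
    pvU ab (vis.insert q 1) + 1 = pvU ab vis := by
  have hq' : q ∈ (pvNL ab).toFinset.filter (fun v => vis.getD v 0 = 0) :=
    Finset.mem_filter.mpr ⟨List.mem_toFinset.mpr hq, h0⟩
  have hset : (pvNL ab).toFinset.filter (fun v => (vis.insert q 1).getD v 0 = 0)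
      = ((pvNL ab).toFinset.filter (fun v => vis.getD v 0 = 0)).erase q := by
    ext x
    simp only [Finset.mem_filter, Finset.mem_erase, PySem.Dict.getD_insert]
    by_cases hxq : x = q <;> simp [hxq]
  unfold pvU
  rw [hset, Finset.card_erase_of_mem hq']
  have hpos : 0 < ((pvNL ab).toFinset.filter (fun v => vis.getD v 0 = 0)).card :=
    Finset.card_pos.mpr ⟨q, hq'⟩
  omega

theorem pv_flip_fold (ab : List (Int × Int)) (p : Int) (hp : pvReach ab p) :
    ∀ (ks : List Int), (∀ q ∈ ks, pvAdj ab p q) →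
    ∀ (vis : PySem.Dict Int Int) (res : Int) (acc : List Int),
    (∀ v, vis.getD v 0 = 0 ∨ vis.getD v 0 = 1) →
    vis.getD 1 0 = 1 →
    (∀ x ∈ acc, pvReach ab x) →
    (∀ v, vis.getD v 0 = 1 → pvP ab v) →
    (∀ v q, vis.getD v 0 = 1 → pvAdj ab v q → vis.getD q 0 = 1 ∨ v ∈ acc ∨ (v = p ∧ q ∈ ks)) →
    (res = 1 ∨ vis.getD res 0 = 1) →
    (∀ v, vis.getD v 0 = 1 → v ≤ res) →
    pvInv ab (ks.foldl pvFlip (vis, res, acc)).2.2 (ks.foldl pvFlip (vis, res, acc)).1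
      (ks.foldl pvFlip (vis, res, acc)).2.1 ∧
    (ks.foldl pvFlip (vis, res, acc)).2.2.length + 2 * pvU ab (ks.foldl pvFlip (vis, res, acc)).1
      ≤ acc.length + 2 * pvU ab vis := by
  intro ks
  induction ks with
  | nil =>
    intro _ vis res acc i01 i1 iQ iS iF iRm iRb
    simp only [List.foldl_nil]
    refine ⟨⟨i01, i1, iQ, iS, ?_, iRm, iRb⟩, le_refl _⟩
    intro v q hv hadj
    rcases iF v q hv hadj with h | h | h
    · exact Or.inl h
    · exact Or.inr h
    · simp at h
  | cons q ks ih =>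
    intro hks vis res acc i01 i1 iQ iS iF iRm iRb
    rw [List.foldl_cons]
    have hq : pvAdj ab p q := hks q (List.mem_cons_self)
    by_cases h0 : vis.getD q 0 = 0
    · have hstep : pvFlip (vis, res, acc) q = (vis.insert q 1, max res q, acc ++ [q]) := by
        simp [pvFlip, h0]
      rw [hstep]
      have hqNL : q ∈ pvNL ab := (pvAdj_memNL ab p q hq).2
      have hqR : pvReach ab q := Relation.ReflTransGen.tail hp hq
      have hUc := pvU_flip ab vis q hqNL h0
      have hmono : ∀ v, vis.getD v 0 = 1 → (vis.insert q 1).getD v 0 = 1 := by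
        intro v hv
        rw [PySem.Dict.getD_insert]
        split_ifs <;> simp [hv]
      obtain ⟨hInv, hlen⟩ := ih (fun q' hq' => hks q' (List.mem_cons_of_mem _ hq'))
        (vis.insert q 1) (max res q) (acc ++ [q])
        (fun v => by
          rw [PySem.Dict.getD_insert]
          split_ifs
          · exact Or.inr rfl
          · exact i01 v)
        (hmono 1 i1)
        (fun x hx => by
          rcases List.mem_append.mp hx with h | h
          · exact iQ x h
          · rw [List.mem_singleton] at h
            subst h
            exact hqR)
        (fun v hv => by
          by_cases hvq : v = q
          · subst hvq
            exact Or.inr ⟨hqNL, hqR⟩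
          · rw [PySem.Dict.getD_insert, if_neg hvq] at hv
            exact iS v hv)
        (fun v q' hv hadj => by
          by_cases hvq : v = q
          · subst hvq
            exact Or.inr (Or.inl (List.mem_append.mpr (Or.inr (List.mem_singleton.mpr rfl))))
          · rw [PySem.Dict.getD_insert, if_neg hvq] at hv
            rcases iF v q' hv hadj with h | h | h
            · exact Or.inl (hmono _ h)
            · exact Or.inr (Or.inl (List.mem_append.mpr (Or.inl h)))
            · rcases List.mem_cons.mp h.2 with rfl | hmem
              · refine Or.inl ?_
                rw [PySem.Dict.getD_insert, if_pos rfl]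
              · exact Or.inr (Or.inr ⟨h.1, hmem⟩))
        (by
          rcases max_choice res q with hm | hm <;> rw [hm]
          · rcases iRm with h | h
            · exact Or.inl h
            · exact Or.inr (hmono _ h)
          · refine Or.inr ?_
            rw [PySem.Dict.getD_insert, if_pos rfl])
        (fun v hv => by
          by_cases hvq : v = q
          · subst hvq
            exact le_max_right _ _
          · rw [PySem.Dict.getD_insert, if_neg hvq] at hv
            exact le_trans (iRb v hv) (le_max_left _ _))
      refine ⟨hInv, ?_⟩
      simp only [List.length_append, List.length_singleton] at hlen
      omega
    · have hstep : pvFlip (vis, res, acc) q = (vis, res, acc) := by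
        simp [pvFlip, h0]
      rw [hstep]
      have h1v : vis.getD q 0 = 1 := (i01 q).resolve_left h0
      refine ih (fun q' hq' => hks q' (List.mem_cons_of_mem _ hq')) vis res acc i01 i1 iQ iS
        (fun v q' hv hadj => ?_) iRm iRb
      rcases iF v q' hv hadj with h | h | h
      · exact Or.inl h
      · exact Or.inr (Or.inl h)
      · rcases List.mem_cons.mp h.2 with rfl | hmem
        · exact Or.inl h1v
        · exact Or.inr (Or.inr ⟨h.1, hmem⟩)

theorem pvBfs_run (ab : List (Int × Int)) (g : PySem.Dict Int (PySem.Dict Int Int))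
    (hg : ∀ p q, q ∈ (g.getD p PySem.Dict.empty).keys ↔ pvAdj ab p q) :
    ∀ (fuel : Nat) (queue : List Int) (vis : PySem.Dict Int Int) (res : Int),
    pvInv ab queue vis res → queue.length + 2 * pvU ab vis ≤ fuel →
    ∃ vis', pvInv ab [] vis' (pvBfs g fuel queue vis res) := by
  intro fuel
  induction fuel with
  | zero =>
    intro queue vis res hInv hcount
    have hq : queue = [] := List.eq_nil_of_length_eq_zero (by omega)
    subst hq
    exact ⟨vis, by simpa [pvBfs] using hInv⟩
  | succ fuel ih =>
    intro queue vis res hInv hcount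
    cases queue with
    | nil => exact ⟨vis, by simpa [pvBfs] using hInv⟩
    | cons p qs =>
      obtain ⟨i01, i1, iQ, iS, iF, iRm, iRb⟩ := hInv
      have hp : pvReach ab p := iQ p List.mem_cons_self
      obtain ⟨hInv', hlen⟩ := pv_flip_fold ab p hp ((g.getD p PySem.Dict.empty).keys)
        (fun q hq => (hg p q).mp hq) vis res qs i01 i1
        (fun x hx => iQ x (List.mem_cons_of_mem _ hx)) iS
        (fun v q hv hadj => by
          rcases iF v q hv hadj with h | h
          · exact Or.inl h
          · rcases List.mem_cons.mp h with rfl | hm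
            · exact Or.inr (Or.inr ⟨rfl, (hg v q).mpr hadj⟩)
            · exact Or.inr (Or.inl hm))
        iRm iRb
      rw [show pvBfs g (fuel + 1) (p :: qs) vis res
          = pvBfs g fuel (((g.getD p PySem.Dict.empty).keys).foldl pvFlip (vis, res, qs)).2.2
              (((g.getD p PySem.Dict.empty).keys).foldl pvFlip (vis, res, qs)).1
              (((g.getD p PySem.Dict.empty).keys).foldl pvFlip (vis, res, qs)).2.1 from rfl]
      refine ih _ _ _ hInv' ?_
      simp only [List.length_cons] at hcount
      omega

theorem pv_closed_reach (ab : List (Int × Int)) (vis : PySem.Dict Int Int)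
    (h1 : vis.getD 1 0 = 1)
    (hcl : ∀ v q, vis.getD v 0 = 1 → pvAdj ab v q → vis.getD q 0 = 1) :
    ∀ v, pvReach ab v → vis.getD v 0 = 1 := by
  intro v h
  induction h with
  | refl => exact h1
  | tail _ hadj ih => exact hcl _ _ ih hadj

theorem pvSolveA_post (n : Int) (ab : List (Int × Int)) : pvPost ab (solve n ab) := by
  have hsolve : solve n ab = pvBfs (List.foldl pvStepG PySem.Dict.empty ab) (4 * ab.length + 2)
      (if (List.foldl pvStepG PySem.Dict.empty ab).contains 1 = true then [1] else [])
      ((List.foldl pvStepV PySem.Dict.empty ab).insert 1 1) 1 := by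
    unfold solve
    rw [PySem.List.foldl_prod_mk (f := pvStepG) (g := pvStepV)]
  rw [hsolve]
  have hGc : ∀ v, ((ab.foldl pvStepG PySem.Dict.empty).contains v = true) ↔ v ∈ pvNL ab := by
    intro v
    rw [(pvBuildG ab _).1 v]
    simp [PySem.Dict.contains_empty]
  have hGk : ∀ p q,
      q ∈ ((ab.foldl pvStepG PySem.Dict.empty).getD p PySem.Dict.empty).keys ↔ pvAdj ab p q := by
    intro p q
    rw [(pvBuildG ab _).2 p q]
    simp [PySem.Dict.getD_empty, PySem.Dict.keys_empty]
  have hv0 : ∀ v, ((ab.foldl pvStepV PySem.Dict.empty).getD v (0 : Int)) = 0 :=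
    pvBuildV ab _ (fun v => by simp [PySem.Dict.getD_empty])
  have hvis0 : ∀ v, (((ab.foldl pvStepV PySem.Dict.empty).insert 1 1).getD v 0 : Int)
      = if v = 1 then 1 else 0 := by
    intro v
    rw [PySem.Dict.getD_insert]
    split_ifs <;> simp [hv0]
  have hU : pvU ab ((ab.foldl pvStepV PySem.Dict.empty).insert 1 1) ≤ 2 * ab.length :=
    le_trans (Finset.card_filter_le _ _)
      (le_trans (List.toFinset_card_le _) (le_of_eq (pvNL_length ab)))
  have hInv : pvInv ab (if (ab.foldl pvStepG PySem.Dict.empty).contains 1 then [1] else [])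
      ((ab.foldl pvStepV PySem.Dict.empty).insert 1 1) 1 := by
    refine ⟨?_, ?_, ?_, ?_, ?_, Or.inl rfl, ?_⟩
    · intro v
      rw [hvis0]
      split_ifs <;> simp
    · rw [hvis0]
      simp
    · intro p hp
      split_ifs at hp with hc
      · rw [List.mem_singleton] at hp
        subst hp
        exact Relation.ReflTransGen.refl
      · simp at hp
    · intro v hv
      rw [hvis0] at hv
      split_ifs at hv with h1
      · exact Or.inl h1
      · norm_num at hv
    · intro v q hv hadj
      rw [hvis0] at hv
      split_ifs at hv with h1
      · subst h1
        split_ifs with hc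
        · exact Or.inr (List.mem_singleton.mpr rfl)
        · exact absurd ((hGc 1).mpr (pvAdj_memNL ab 1 q hadj).1) hc
      · norm_num at hv
    · intro v hv
      rw [hvis0] at hv
      split_ifs at hv with h1
      · omega
      · norm_num at hv
  obtain ⟨vis', hInv'⟩ := pvBfs_run ab _ hGk (4 * ab.length + 2) _ _ 1 hInv (by
    split_ifs <;> simp only [List.length_singleton, List.length_nil] <;> omega)
  obtain ⟨i01', i1', _, iS', iF', iRm', iRb'⟩ := hInv'
  have hcl : ∀ v q, vis'.getD v 0 = 1 → pvAdj ab v q → vis'.getD q 0 = 1 :=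
    fun v q hv ha => (iF' v q hv ha).resolve_right (by simp)
  have hreach := pv_closed_reach ab vis' i1' hcl
  constructor
  · rcases iRm' with h | h
    · exact Or.inl h
    · exact iS' _ h
  · intro v hv
    rcases hv with rfl | ⟨_, hvR⟩
    · exact iRb' 1 i1'
    · exact iRb' v (hreach v hvR)

-- ---- saturation (B) ----

theorem pvAdd_len_le (s : PySem.Set Int) (x : Int) : s.length ≤ (s.add x).length := by
  unfold PySem.Set.add
  split <;> simp

theorem pvAdd_len_new (s : PySem.Set Int) (x : Int) (h : x ∉ s) :
    (s.add x).length = s.length + 1 := by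
  unfold PySem.Set.add
  rw [if_neg (by simpa [PySem.Set.contains_iff] using h)]
  simp

theorem pvPassStep_pos (r : PySem.Set Int) (ch : Bool) (e : Int × Int)
    (h : (r.contains e.1 != r.contains e.2) = true) :
    pvPassStep (r, ch) e = ((r.add e.1).add e.2, true) := by
  show (if (r.contains e.1 != r.contains e.2) = true then ((r.add e.1).add e.2, true)
      else (r, ch)) = _
  rw [if_pos h]

theorem pvPassStep_neg (r : PySem.Set Int) (ch : Bool) (e : Int × Int)
    (h : ¬ (r.contains e.1 != r.contains e.2) = true) :
    pvPassStep (r, ch) e = (r, ch) := by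
  show (if (r.contains e.1 != r.contains e.2) = true then ((r.add e.1).add e.2, true)
      else (r, ch)) = _
  rw [if_neg h]

theorem pvPass_mono :
    ∀ (l : List (Int × Int)) (r : PySem.Set Int) (ch : Bool) (x : Int),
      x ∈ r → x ∈ (l.foldl pvPassStep (r, ch)).1 := by
  intro l
  induction l with
  | nil => intro r ch x hx; simpa using hx
  | cons e l ih =>
    intro r ch x hx
    rw [List.foldl_cons]
    by_cases hcr : (r.contains e.1 != r.contains e.2) = true
    · rw [pvPassStep_pos r ch e hcr]
      exact ih _ _ x ((PySem.Set.mem_add _ _ _).mpr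
        (Or.inl ((PySem.Set.mem_add _ _ _).mpr (Or.inl hx))))
    · rw [pvPassStep_neg r ch e hcr]
      exact ih _ _ x hx

theorem pvPass_sound (ab : List (Int × Int)) :
    ∀ (l : List (Int × Int)) (r : PySem.Set Int) (ch : Bool),
      (∀ e ∈ l, e ∈ ab) → (∀ x ∈ r, pvReach ab x) →
      ∀ x ∈ (l.foldl pvPassStep (r, ch)).1, pvReach ab x := by
  intro l
  induction l with
  | nil => intro r ch _ hr x hx; exact hr x (by simpa using hx)
  | cons e l ih =>
    intro r ch he hr
    rw [List.foldl_cons]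
    have he' : e ∈ ab := he e List.mem_cons_self
    by_cases hcr : (r.contains e.1 != r.contains e.2) = true
    · rw [pvPassStep_pos r ch e hcr]
      have hab : pvAdj ab e.1 e.2 := Or.inl (by simpa using he')
      have h12 : pvReach ab e.1 ∧ pvReach ab e.2 := by
        rcases Bool.eq_false_or_eq_true (r.contains e.1) with hb | hb
        · have h1 : pvReach ab e.1 := hr _ ((PySem.Set.contains_iff _ _).mp hb)
          exact ⟨h1, Relation.ReflTransGen.tail h1 hab⟩
        · have hb2 : r.contains e.2 = true := by
            rcases Bool.eq_false_or_eq_true (r.contains e.2) with hb2 | hb2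
            · exact hb2
            · rw [hb, hb2] at hcr; simp at hcr
          have h2 : pvReach ab e.2 := hr _ ((PySem.Set.contains_iff _ _).mp hb2)
          exact ⟨Relation.ReflTransGen.tail h2 (Or.inr (by simpa using he')), h2⟩
      refine ih _ _ (fun e' he'' => he e' (List.mem_cons_of_mem _ he'')) ?_
      intro x hx
      rcases (PySem.Set.mem_add _ _ _).mp hx with hx' | rfl
      · rcases (PySem.Set.mem_add _ _ _).mp hx' with hx'' | rfl
        · exact hr x hx''
        · exact h12.1
      · exact h12.2
    · rw [pvPassStep_neg r ch e hcr]
      exact ih _ _ (fun e' he'' => he e' (List.mem_cons_of_mem _ he'')) hr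

theorem pvPass_nodup :
    ∀ (l : List (Int × Int)) (r : PySem.Set Int) (ch : Bool),
      r.Nodup → (l.foldl pvPassStep (r, ch)).1.Nodup := by
  intro l
  induction l with
  | nil => intro r ch h; simpa using h
  | cons e l ih =>
    intro r ch h
    rw [List.foldl_cons]
    by_cases hcr : (r.contains e.1 != r.contains e.2) = true
    · rw [pvPassStep_pos r ch e hcr]
      exact ih _ _ (PySem.Set.nodup_add _ _ (PySem.Set.nodup_add _ _ h))
    · rw [pvPassStep_neg r ch e hcr]
      exact ih _ _ h

theorem pvPass_sub (ab : List (Int × Int)) :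
    ∀ (l : List (Int × Int)) (r : PySem.Set Int) (ch : Bool),
      (∀ x ∈ r, x ∈ (1 : Int) :: pvNL ab) → (∀ e ∈ l, e ∈ ab) →
      ∀ x ∈ (l.foldl pvPassStep (r, ch)).1, x ∈ (1 : Int) :: pvNL ab := by
  intro l
  induction l with
  | nil => intro r ch hr _ x hx; exact hr x (by simpa using hx)
  | cons e l ih =>
    intro r ch hr he
    rw [List.foldl_cons]
    have he' : e ∈ ab := he e List.mem_cons_self
    have hNL := pvAdj_memNL ab e.1 e.2 (Or.inl (by simpa using he'))
    by_cases hcr : (r.contains e.1 != r.contains e.2) = true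
    · rw [pvPassStep_pos r ch e hcr]
      refine ih _ _ ?_ (fun e' he'' => he e' (List.mem_cons_of_mem _ he''))
      intro x hx
      rcases (PySem.Set.mem_add _ _ _).mp hx with hx' | rfl
      · rcases (PySem.Set.mem_add _ _ _).mp hx' with hx'' | rfl
        · exact hr x hx''
        · exact List.mem_cons_of_mem _ hNL.1
      · exact List.mem_cons_of_mem _ hNL.2
    · rw [pvPassStep_neg r ch e hcr]
      exact ih _ _ hr (fun e' he'' => he e' (List.mem_cons_of_mem _ he''))

theorem pvPass_true :
    ∀ (l : List (Int × Int)) (r : PySem.Set Int),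
      (l.foldl pvPassStep (r, true)).2 = true := by
  intro l
  induction l with
  | nil => intro r; simp
  | cons e l ih =>
    intro r
    rw [List.foldl_cons]
    by_cases hcr : (r.contains e.1 != r.contains e.2) = true
    · rw [pvPassStep_pos r true e hcr]
      exact ih _
    · rw [pvPassStep_neg r true e hcr]
      exact ih _

theorem pvPass_false :
    ∀ (l : List (Int × Int)) (r : PySem.Set Int),
      (l.foldl pvPassStep (r, false)).2 = false →
      (l.foldl pvPassStep (r, false)).1 = r ∧ ∀ e ∈ l, r.contains e.1 = r.contains e.2 := by
  intro l
  induction l with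
  | nil => intro r _; simp
  | cons e l ih =>
    intro r h
    rw [List.foldl_cons] at h ⊢
    by_cases hcr : (r.contains e.1 != r.contains e.2) = true
    · rw [pvPassStep_pos r false e hcr] at h
      exact absurd h (by simp [pvPass_true])
    · rw [pvPassStep_neg r false e hcr] at h ⊢
      obtain ⟨h1, h2⟩ := ih r h
      refine ⟨h1, fun e' he' => ?_⟩
      rcases List.mem_cons.mp he' with rfl | hm
      · simpa using hcr
      · exact h2 e' hm

theorem pvPass_len :
    ∀ (l : List (Int × Int)) (r : PySem.Set Int) (ch : Bool),
      r.length ≤ (l.foldl pvPassStep (r, ch)).1.length := by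
  intro l
  induction l with
  | nil => intro r ch; simp
  | cons e l ih =>
    intro r ch
    rw [List.foldl_cons]
    by_cases hcr : (r.contains e.1 != r.contains e.2) = true
    · rw [pvPassStep_pos r ch e hcr]
      exact le_trans (le_trans (pvAdd_len_le r e.1) (pvAdd_len_le _ e.2)) (ih _ _)
    · rw [pvPassStep_neg r ch e hcr]
      exact ih _ _

theorem pvPass_grow :
    ∀ (l : List (Int × Int)) (r : PySem.Set Int),
      (l.foldl pvPassStep (r, false)).2 = true →
      r.length < (l.foldl pvPassStep (r, false)).1.length := by
  intro l
  induction l with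
  | nil => intro r h; simp at h
  | cons e l ih =>
    intro r h
    rw [List.foldl_cons] at h ⊢
    by_cases hcr : (r.contains e.1 != r.contains e.2) = true
    · rw [pvPassStep_pos r false e hcr] at h ⊢
      have hne : r.contains e.1 ≠ r.contains e.2 := by simpa using hcr
      have hne12 : e.1 ≠ e.2 := fun hEq => hne (by rw [hEq])
      have hgrow : r.length < ((r.add e.1).add e.2).length := by
        rcases Bool.eq_false_or_eq_true (r.contains e.1) with hb | hb
        · have hb2 : r.contains e.2 = false := by
            rcases Bool.eq_false_or_eq_true (r.contains e.2) with hb2 | hb2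
            · exact absurd (hb.trans hb2.symm) hne
            · exact hb2
          have hm2 : e.2 ∉ r := fun hm => by
            rw [(PySem.Set.contains_iff r e.2).mpr hm] at hb2
            exact absurd hb2 (by simp)
          have h2 : e.2 ∉ r.add e.1 := by
            intro hmem
            rcases (PySem.Set.mem_add _ _ _).mp hmem with hm | hm
            · exact hm2 hm
            · exact hne12 hm.symm
          have := pvAdd_len_new (r.add e.1) e.2 h2
          have := pvAdd_len_le r e.1
          omega
        · have h1 : e.1 ∉ r := fun hm => by
            rw [(PySem.Set.contains_iff r e.1).mpr hm] at hb
            exact absurd hb (by simp)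
          have := pvAdd_len_new r e.1 h1
          have := pvAdd_len_le (r.add e.1) e.2
          omega
      exact lt_of_lt_of_le hgrow (pvPass_len l _ true)
    · rw [pvPassStep_neg r false e hcr] at h ⊢
      exact ih r h

theorem pvSat_run (ab : List (Int × Int)) :
    ∀ (fuel : Nat) (r : PySem.Set Int), r.Nodup → (∀ x ∈ r, x ∈ (1 : Int) :: pvNL ab) →
      ((1 : Int) :: pvNL ab).toFinset.card ≤ fuel + r.length →
      (1 : Int) ∈ r → (∀ x ∈ r, pvReach ab x) →
      (∀ x ∈ r, x ∈ pvSat ab fuel r) ∧ (∀ x ∈ pvSat ab fuel r, pvReach ab x) ∧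
      (∀ e ∈ ab, (e.1 ∈ pvSat ab fuel r ↔ e.2 ∈ pvSat ab fuel r)) ∧
      (1 : Int) ∈ pvSat ab fuel r := by
  intro fuel
  induction fuel with
  | zero =>
    intro r hnd hsub hcard h1 hR
    simp only [pvSat]
    have heq : r.toFinset = ((1 : Int) :: pvNL ab).toFinset := by
      apply Finset.eq_of_subset_of_card_le
      · intro x hx
        exact List.mem_toFinset.mpr (hsub x (List.mem_toFinset.mp hx))
      · rw [List.toFinset_card_of_nodup hnd]
        simpa using hcard
    have hall : ∀ x, x ∈ (1 : Int) :: pvNL ab → x ∈ r := by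
      intro x hx
      rw [← List.mem_toFinset, heq, List.mem_toFinset]
      exact hx
    refine ⟨fun x hx => hx, hR, ?_, h1⟩
    intro e he
    have h1e : e.1 ∈ r := hall e.1
      (List.mem_cons_of_mem _ (pvAdj_memNL ab e.1 e.2 (Or.inl (by simpa using he))).1)
    have h2e : e.2 ∈ r := hall e.2
      (List.mem_cons_of_mem _ (pvAdj_memNL ab e.1 e.2 (Or.inl (by simpa using he))).2)
    exact ⟨fun _ => h2e, fun _ => h1e⟩
  | succ fuel ih =>
    intro r hnd hsub hcard h1 hR
    by_cases hch : (ab.foldl pvPassStep (r, false)).2 = true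
    · have hrw : pvSat ab (fuel + 1) r = pvSat ab fuel (ab.foldl pvPassStep (r, false)).1 := by
        simp [pvSat, hch]
      rw [hrw]
      obtain ⟨m1, m2, m3, m4⟩ := ih ((ab.foldl pvPassStep (r, false)).1)
        (pvPass_nodup ab r false hnd)
        (pvPass_sub ab ab r false hsub (fun e he => he))
        (by have := pvPass_grow ab r hch; omega)
        (pvPass_mono ab r false 1 h1)
        (pvPass_sound ab ab r false (fun e he => he) hR)
      exact ⟨fun x hx => m1 x (pvPass_mono ab r false x hx), m2, m3, m4⟩
    · have hrw : pvSat ab (fuel + 1) r = (ab.foldl pvPassStep (r, false)).1 := by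
        simp [pvSat, hch]
      obtain ⟨heq, hflat⟩ := pvPass_false ab r (by simpa using hch)
      rw [hrw, heq]
      refine ⟨fun x hx => hx, hR, ?_, h1⟩
      intro e he
      constructor <;> intro hm
      · exact (PySem.Set.contains_iff _ _).mp
          ((hflat e he) ▸ (PySem.Set.contains_iff _ _).mpr hm)
      · exact (PySem.Set.contains_iff _ _).mp
          ((hflat e he).symm ▸ (PySem.Set.contains_iff _ _).mpr hm)

def pvBStep (F : PySem.Set Int) (res : Int) (e : Int × Int) : Int :=
  let res1 := if F.contains e.1 then max res e.1 else res
  if F.contains e.2 then max res1 e.2 else res1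

theorem pvResB_fold (F : PySem.Set Int) :
    ∀ (l : List (Int × Int)) (res : Int),
      (l.foldl (pvBStep F) res = res ∨
        ∃ e ∈ l, (l.foldl (pvBStep F) res = e.1 ∧ e.1 ∈ F) ∨
          (l.foldl (pvBStep F) res = e.2 ∧ e.2 ∈ F)) ∧
      res ≤ l.foldl (pvBStep F) res ∧
      (∀ e ∈ l, (e.1 ∈ F → e.1 ≤ l.foldl (pvBStep F) res) ∧
        (e.2 ∈ F → e.2 ≤ l.foldl (pvBStep F) res)) := by
  intro l
  induction l with
  | nil =>
    intro res
    simp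
  | cons e l ih =>
    intro res
    rw [List.foldl_cons]
    obtain ⟨ihm, ihle, ihb⟩ := ih (pvBStep F res e)
    have hstep : res ≤ pvBStep F res e ∧
        (pvBStep F res e = res ∨ (pvBStep F res e = e.1 ∧ e.1 ∈ F) ∨
          (pvBStep F res e = e.2 ∧ e.2 ∈ F)) ∧
        (e.1 ∈ F → e.1 ≤ pvBStep F res e) ∧ (e.2 ∈ F → e.2 ≤ pvBStep F res e) := by
      unfold pvBStep
      by_cases hc1 : F.contains e.1 = true <;> by_cases hc2 : F.contains e.2 = true <;>
        simp only [hc1, hc2, if_true, if_false, Bool.false_eq_true] <;>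
        [skip; skip; skip; skip] <;>
        refine ⟨?_, ?_, ?_, ?_⟩ <;>
          simp_all <;> try omega
    obtain ⟨hs0, hs1, hs2, hs3⟩ := hstep
    refine ⟨?_, le_trans hs0 ihle, ?_⟩
    · rcases ihm with hy | ⟨e', he', hcase⟩
      · rcases hs1 with h | ⟨h, hF⟩ | ⟨h, hF⟩
        · exact Or.inl (hy.trans h)
        · exact Or.inr ⟨e, List.mem_cons_self, Or.inl ⟨hy.trans h, hF⟩⟩
        · exact Or.inr ⟨e, List.mem_cons_self, Or.inr ⟨hy.trans h, hF⟩⟩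
      · exact Or.inr ⟨e', List.mem_cons_of_mem _ he', hcase⟩
    · intro e' he'
      rcases List.mem_cons.mp he' with rfl | hm
      · exact ⟨fun hF => le_trans (hs2 hF) ihle, fun hF => le_trans (hs3 hF) ihle⟩
      · exact ihb e' hm

theorem pvSolveB_post (n : Int) (ab : List (Int × Int)) : pvPost ab (solve_alt n ab) := by
  have hofl : PySem.Set.ofList ([1] : List Int) = [1] := rfl
  have hsolve : solve_alt n ab
      = ab.foldl (pvBStep (pvSat ab (2 * ab.length + 1) (PySem.Set.ofList [1]))) 1 := rfl
  rw [hsolve]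
  obtain ⟨hmono, hsound, hclosed, h1F⟩ := pvSat_run ab (2 * ab.length + 1)
    (PySem.Set.ofList [1])
    (by rw [hofl]; simp)
    (by
      rw [hofl]
      intro x hx
      rw [List.mem_singleton] at hx
      subst hx
      exact List.mem_cons_self)
    (by
      have h1 := List.toFinset_card_le ((1 : Int) :: pvNL ab)
      have h2 := pvNL_length ab
      rw [hofl]
      simp only [List.length_cons] at *
      omega)
    (by rw [hofl]; exact List.mem_singleton.mpr rfl)
    (by
      rw [hofl]
      intro x hx
      rw [List.mem_singleton] at hx
      subst hx
      exact Relation.ReflTransGen.refl)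
  have hcomp : ∀ v, pvReach ab v →
      v ∈ pvSat ab (2 * ab.length + 1) (PySem.Set.ofList [1]) := by
    intro v h
    induction h with
    | refl => exact h1F
    | tail _ hadj ih =>
      rcases hadj with h' | h'
      · exact (hclosed _ h').mp ih
      · exact (hclosed _ h').mpr ih
  obtain ⟨hmem, hle, hbnd⟩ := pvResB_fold (pvSat ab (2 * ab.length + 1) (PySem.Set.ofList [1])) ab 1
  constructor
  · rcases hmem with h | ⟨e, he, ⟨h, hFm⟩ | ⟨h, hFm⟩⟩
    · rw [h]
      exact Or.inl rfl
    · rw [h]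
      exact Or.inr ⟨(pvAdj_memNL ab e.1 e.2 (Or.inl (by simpa using he))).1, hsound _ hFm⟩
    · rw [h]
      exact Or.inr ⟨(pvAdj_memNL ab e.1 e.2 (Or.inl (by simpa using he))).2, hsound _ hFm⟩
  · intro v hv
    rcases hv with rfl | ⟨hNL, hR⟩
    · exact hle
    · simp only [pvNL, List.mem_flatMap, List.mem_cons, List.not_mem_nil, or_false] at hNL
      obtain ⟨e, he, hv12⟩ := hNL
      have hvF := hcomp _ hR
      rcases hv12 with rfl | rfl
      · exact (hbnd e he).1 hvF
      · exact (hbnd e he).2 hvF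

-- ===== VERDICT (by name: the statement is the Claim_ definition above) =====
theorem solve_spec : Claim_equal_solve := by
  intro n ab _
  show solve n ab = solve_alt n ab
  exact pvPost_unique ab _ _ (pvSolveA_post n ab) (pvSolveB_post n ab)
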